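-- pv_equiv track=rewrite | github.com/woominyo/AlgorithmStudy | programmers/pccpstudy/pccp_test1_01.py | solution
-- ===== SOURCE A (Python) =====
-- def solution(input_string):
--     answer = ''
--     used = [] #한번이라도 나온 알파벳
--     loner = []
--     before_char = ''
--     #
--     for char in input_string:
--         if char == before_char:
--             continue
--
--         if char not in used:
--             used.append(char)
--         elif char in used:
--             loner.append(char)
--
--         before_char = char
--     loner = list(set(loner))
--     loner.sort()
--     answer = ''.join(loner)
--     if answer == '':
--         return 'N'
--
--     return answer
-- ===== SOURCE B (Python) =====
-- def solution(input_string):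
--     # For each candidate char (ascending), walk past everything before its
--     # first run, then past that run; keep the char iff it reappears later.
--     out = []
--     for c in sorted(set(input_string)):
--         i = 0
--         while i < len(input_string) and input_string[i] != c:
--             i += 1
--         while i < len(input_string) and input_string[i] == c:
--             i += 1
--         if c in input_string[i:]:
--             out.append(c)
--     return ''.join(out) or 'N'
-- ===== Notes on version B (the rewrite author's own statement) =====
-- stated objective: alternative
-- what changed: Replaces A's single stateful scan (used/loner lists with a before_char skip, then set-dedup and sort) by a per-candidate search: for each distinct character in ascending order it advances past everything before that character's first run, then past the run itself, and keeps the character iff it still occurs in the remaining suffix; no global loop state, no dedup of a collected list. (constant-factor: B's inner scans run as C-level substring tests instead of A's per-character Python loop with list-membership scans).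
import Mathlib
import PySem

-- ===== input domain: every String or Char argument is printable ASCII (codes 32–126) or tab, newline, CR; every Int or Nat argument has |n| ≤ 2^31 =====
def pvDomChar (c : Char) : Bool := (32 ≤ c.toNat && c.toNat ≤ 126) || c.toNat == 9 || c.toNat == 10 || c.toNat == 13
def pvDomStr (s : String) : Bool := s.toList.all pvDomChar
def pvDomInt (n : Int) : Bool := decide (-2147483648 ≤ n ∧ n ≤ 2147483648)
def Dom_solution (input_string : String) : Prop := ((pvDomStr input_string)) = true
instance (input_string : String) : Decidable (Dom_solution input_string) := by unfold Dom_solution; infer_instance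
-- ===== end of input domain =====

-- B replaces A's single stateful scan (used/loner lists with a before_char skip) by a
-- per-candidate search: for each distinct char it skips past the char's first run and keeps
-- it iff it reappears in the remaining suffix (objective: alternative, same cost).

-- ===== PORT A =====
-- loop body of A; state = (used, loner, before_char), before_char '' modelled as Option Char (none = '')
def pvStepA (st : List Char × List Char × Option Char) (char : Char) :
    List Char × List Char × Option Char :=
  if some char = st.2.2 then st
  else if char ∉ st.1 then (st.1 ++ [char], st.2.1, some char)
  else (st.1, st.2.1 ++ [char], some char)

def solution (input_string : String) : String :=
  let st := input_string.toList.foldl pvStepA ([], [], none)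
  -- loner = list(set(loner)); loner.sort(): set dedup then sort
  let loner := PySem.List.sorted (PySem.Set.ofList st.2.1) (fun x => x) false
  let answer := String.ofList loner
  if answer = "" then "N" else answer

-- ===== PORT B =====
-- The two index-advancing while loops of Source B compute the suffix that starts after c's first
-- run: skipping 'input_string[i] != c' then 'input_string[i] == c' is exactly the two
-- dropWhiles; 'c in input_string[i:]' is PySem.Chars.isIn on that suffix (exact).
def solution_alt (input_string : String) : String :=
  let cs := input_string.toList
  let out := (PySem.List.sorted (PySem.Set.ofList cs) (fun x => x) false).foldl
    (fun acc c =>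
      if PySem.Chars.isIn [c] ((cs.dropWhile (fun a => a != c)).dropWhile (fun a => a == c))
      then acc ++ [c] else acc) []
  let answer := String.ofList out
  if answer = "" then "N" else answer

-- ===== PRECONDITION & SPEC =====
def Spec_solution (input_string : String) (out : String) : Prop := out = solution_alt input_string
instance (input_string : String) (out : String) : Decidable (Spec_solution input_string out) := by unfold Spec_solution; infer_instance

-- ===== CLAIM (what is proved, stated in full; the proofs are below) =====
def Claim_equal_solution : Prop := ∀ (input_string : String), Dom_solution input_string → Spec_solution input_string (solution input_string)

-- ===== LEMMAS AND PROOFS =====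

-- reference run-length compression relative to the previous character
def pvRle (b : Option Char) : List Char → List Char
  | [] => []
  | c :: t => if some c = b then pvRle b t else c :: pvRle (some c) t

-- A's loop body with the before-skip removed
def pvCore (st : List Char × List Char) (c : Char) : List Char × List Char :=
  if c ∉ st.1 then (st.1 ++ [c], st.2) else (st.1, st.2 ++ [c])

theorem pvA_fold_eq (cs : List Char) : ∀ (u l : List Char) (b : Option Char),
    ((cs.foldl pvStepA (u, l, b)).1, (cs.foldl pvStepA (u, l, b)).2.1) =
      (pvRle b cs).foldl pvCore (u, l) := by
  induction cs with
  | nil => intro u l b; rfl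
  | cons c t ih =>
    intro u l b
    simp only [List.foldl_cons, pvRle]
    by_cases h : some c = b
    · simp only [pvStepA, if_pos h, ih]
    · by_cases hu : c ∈ u
      · have h1 : pvStepA (u, l, b) c = (u, l ++ [c], some c) := by
          simp [pvStepA, h, hu]
        have h2 : pvCore (u, l) c = (u, l ++ [c]) := by
          simp [pvCore, hu]
        rw [h1, if_neg h, List.foldl_cons, h2, ih]
      · have h1 : pvStepA (u, l, b) c = (u ++ [c], l, some c) := by
          simp [pvStepA, h, hu]
        have h2 : pvCore (u, l) c = (u ++ [c], l) := by
          simp [pvCore, hu]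
        rw [h1, if_neg h, List.foldl_cons, h2, ih]

theorem pvCore_loner_mem (r : List Char) : ∀ (u l : List Char) (c : Char),
    c ∈ (r.foldl pvCore (u, l)).2 ↔ c ∈ l ∨ (c ∈ u ∧ 1 ≤ r.count c) ∨ 2 ≤ r.count c := by
  induction r with
  | nil => intro u l c; simp
  | cons a t ih =>
    intro u l c
    simp only [List.foldl_cons, pvCore]
    by_cases ha : a ∈ u
    · rw [if_neg (by simp [ha]), ih]
      by_cases hc : c = a
      · subst hc
        simp only [List.count_cons_self, List.mem_append, List.mem_singleton]
        constructor
        · intro _; exact Or.inr (Or.inl ⟨ha, by omega⟩)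
        · intro _; exact Or.inl (Or.inr trivial)
      · rw [List.count_cons_of_ne (Ne.symm hc)]
        simp only [List.mem_append, List.mem_singleton, hc, or_false]
    · rw [if_pos ha, ih]
      by_cases hc : c = a
      · subst hc
        simp only [List.count_cons_self, List.mem_append, List.mem_singleton]
        constructor
        · rintro (h | ⟨_, h2⟩ | h3)
          · exact Or.inl h
          · exact Or.inr (Or.inr (by omega))
          · exact Or.inr (Or.inr (by omega))
        · rintro (h | ⟨hu, _⟩ | h3)
          · exact Or.inl h
          · exact (ha hu).elim
          · exact Or.inr (Or.inl ⟨Or.inr trivial, by omega⟩)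
      · rw [List.count_cons_of_ne (Ne.symm hc)]
        simp only [List.mem_append, List.mem_singleton, hc, or_false]

-- membership in the compressed list is plain membership, when the previous char differs
theorem pvMem_rle (c : Char) (t : List Char) : ∀ (b : Option Char), b ≠ some c →
    (c ∈ pvRle b t ↔ c ∈ t) := by
  induction t with
  | nil => intro b _; simp [pvRle]
  | cons a t ih =>
    intro b hb
    simp only [pvRle]
    by_cases h : some a = b
    · have hac : a ≠ c := fun he => hb (he ▸ h.symm)
      rw [if_pos h, ih b hb]
      simp only [List.mem_cons]
      exact ⟨Or.inr, fun hm => hm.resolve_left fun he => hac he.symm⟩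
    · rw [if_neg h]
      by_cases hac : a = c
      · subst hac; simp
      · simp only [List.mem_cons]
        rw [ih (some a) (by simp [hac])]

-- membership after absorbing a leading run of c equals membership in the stripped tail
theorem pvMem_rle_self (c : Char) (t : List Char) :
    c ∈ pvRle (some c) t ↔ c ∈ t.dropWhile (fun a => a == c) := by
  induction t with
  | nil => simp [pvRle]
  | cons a t ih =>
    simp only [pvRle, List.dropWhile_cons]
    by_cases hac : a = c
    · subst hac; rw [if_pos rfl, if_pos (by simp)]; exact ih
    · rw [if_neg (fun h => hac (Option.some.inj h)), if_neg (by simp [hac])]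
      simp only [List.mem_cons]
      rw [pvMem_rle c t (some a) (by simp [hac])]

-- a char has at least two runs  ↔  it reappears after its first run
theorem pvTwo_runs_iff (c : Char) (t : List Char) : ∀ (b : Option Char), b ≠ some c →
    (2 ≤ (pvRle b t).count c ↔
      c ∈ (t.dropWhile (fun a => a != c)).dropWhile (fun a => a == c)) := by
  induction t with
  | nil => intro b _; simp [pvRle]
  | cons a t ih =>
    intro b hb
    simp only [pvRle, List.dropWhile_cons]
    by_cases h : some a = b
    · have hac : a ≠ c := fun he => hb (he ▸ h.symm)
      rw [if_pos h, if_pos (by simp [hac]), ih b hb]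
    · rw [if_neg h]
      by_cases hac : a = c
      · subst hac
        rw [if_neg (by simp), List.count_cons_self, List.dropWhile_cons, if_pos (by simp)]
        constructor
        · intro hcount
          exact (pvMem_rle_self a t).mp (List.one_le_count_iff.mp (by omega))
        · intro hmem
          have := List.one_le_count_iff.mpr ((pvMem_rle_self a t).mpr hmem)
          omega
      · rw [List.count_cons_of_ne hac, if_pos (by simp [hac])]
        exact ih (some a) (by simp [hac])

-- ===== VERDICT (by name: the statement is the Claim_ definition above) =====
theorem solution_spec : Claim_equal_solution := by
  intro s _
  unfold Spec_solution solution solution_alt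
  simp only
  set cs := s.toList with hcs
  -- A's loner list
  have hloner : (cs.foldl pvStepA ([], [], none)).2.1 = ((pvRle none cs).foldl pvCore ([], [])).2 :=
    congrArg Prod.snd (pvA_fold_eq cs [] [] none)
  rw [hloner]
  -- B's loop is a filter over the sorted distinct chars
  have hfold : ∀ L : List Char, L.foldl
      (fun acc c =>
        if PySem.Chars.isIn [c] ((cs.dropWhile (fun a => a != c)).dropWhile (fun a => a == c))
        then acc ++ [c] else acc) [] =
      L.filter (fun c =>
        PySem.Chars.isIn [c] ((cs.dropWhile (fun a => a != c)).dropWhile (fun a => a == c))) := by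
    intro L
    simpa using PySem.List.foldl_append_if_eq_filter
      (l := L) (acc := [])
      (p := fun c => PySem.Chars.isIn [c] ((cs.dropWhile (fun a => a != c)).dropWhile (fun a => a == c)))
  rw [hfold]
  -- both result lists are equal
  have hsp := PySem.List.sorted_perm (PySem.Set.ofList cs) (fun x => x) false
  have hnodup_sorted : (PySem.List.sorted (PySem.Set.ofList cs) (fun x => x) false).Nodup :=
    hsp.nodup_iff.mpr (PySem.Set.nodup_ofList cs)
  have hmem : ∀ c : Char,
      c ∈ (PySem.List.sorted (PySem.Set.ofList cs) (fun x => x) false).filter (fun c =>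
        PySem.Chars.isIn [c] ((cs.dropWhile (fun a => a != c)).dropWhile (fun a => a == c))) ↔
      c ∈ PySem.Set.ofList (((pvRle none cs).foldl pvCore ([], [])).2) := by
    intro c
    rw [List.mem_filter, hsp.mem_iff, PySem.Set.mem_ofList, PySem.Set.mem_ofList,
      pvCore_loner_mem, PySem.Chars.isIn_iff_infix, List.singleton_infix_iff,
      ← pvTwo_runs_iff c cs none (by simp)]
    constructor
    · rintro ⟨_, h⟩; exact Or.inr (Or.inr h)
    · rintro (h | ⟨h, _⟩ | h)
      · exact absurd h (by simp)
      · exact absurd h (by simp)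
      · refine ⟨?_, h⟩
        have h1 : c ∈ pvRle none cs := List.one_le_count_iff.mp (by omega)
        exact (pvMem_rle c cs none (by simp)).mp h1
  have hperm : ((PySem.List.sorted (PySem.Set.ofList cs) (fun x => x) false).filter (fun c =>
      PySem.Chars.isIn [c] ((cs.dropWhile (fun a => a != c)).dropWhile (fun a => a == c)))).Perm
      (PySem.Set.ofList (((pvRle none cs).foldl pvCore ([], [])).2)) := by
    rw [List.perm_ext_iff_of_nodup (hnodup_sorted.filter _) (PySem.Set.nodup_ofList _)]
    exact hmem
  have hpair : ((PySem.List.sorted (PySem.Set.ofList cs) (fun x => x) false).filter (fun c =>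
      PySem.Chars.isIn [c] ((cs.dropWhile (fun a => a != c)).dropWhile (fun a => a == c)))).Pairwise
      (fun a b : Char => a < b) := by
    refine List.Pairwise.filter _ ?_
    have hle := PySem.List.sorted_pairwise (xs := PySem.Set.ofList cs) (key := fun x => x)
    exact (hle.and hnodup_sorted).imp (fun h => lt_of_le_of_ne h.1 h.2)
  rw [PySem.List.sorted_eq_of_perm_of_pairwise_lt _ _ (fun x => x) hperm hpair]
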